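-- pv_equiv track=rewrite | github.com/mluisas/ProgLab | cortandopapel.py | corte
-- ===== SOURCE A (Python) =====
-- def corte(lista, altura):
--     pedacos = 1
--     mais_um = True
--     for i in range(len(lista)):
--         if lista[i] > altura and mais_um == True:
--             pedacos += 1
--             mais_um = False
--         elif lista[i] < altura:
--             mais_um = True
--     return pedacos
-- ===== SOURCE B (Python) =====
-- def corte(lista, altura):
--     flags = [x > altura for x in lista if x != altura]
--     return 1 + sum(1 for i, f in enumerate(flags) if f and (i == 0 or not flags[i - 1]))
-- ===== Notes on version B (the rewrite author's own statement) =====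
-- stated objective: alternative
-- what changed: Replaces the stateful pedacos/mais_um flag loop with a build-then-count shape: filter out elements equal to altura, map the rest to above/below booleans, count the starts of maximal True runs, and add 1.
import Mathlib
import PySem

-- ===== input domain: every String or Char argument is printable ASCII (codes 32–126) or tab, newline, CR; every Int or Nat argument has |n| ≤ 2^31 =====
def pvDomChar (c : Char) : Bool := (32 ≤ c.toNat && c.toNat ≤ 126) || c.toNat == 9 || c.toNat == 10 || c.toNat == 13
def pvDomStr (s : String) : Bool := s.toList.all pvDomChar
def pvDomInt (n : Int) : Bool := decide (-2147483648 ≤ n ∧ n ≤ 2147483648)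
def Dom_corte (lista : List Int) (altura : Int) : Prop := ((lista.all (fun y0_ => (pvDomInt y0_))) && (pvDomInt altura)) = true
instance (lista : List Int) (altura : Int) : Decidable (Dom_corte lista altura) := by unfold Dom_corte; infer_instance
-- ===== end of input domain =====

-- B rebuilds the answer as 1 + (number of maximal runs of elements above altura,
-- after dropping elements equal to altura), instead of A's pedacos/mais_um flag loop.


-- ===== PORT A =====
-- the for-loop over range(len(lista)) reading lista[i] in order, with state (pedacos, mais_um)
def corte (lista : List Int) (altura : Int) : Int :=
  (lista.foldl (fun (s : Int × Bool) x =>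
      if x > altura ∧ s.2 = true then (s.1 + 1, false)
      else if x < altura then (s.1, true)
      else s) (1, true)).1

-- ===== PORT B =====
-- sum over enumerate(flags): counts f that are True with a False/absent predecessor
def pvCountStarts (prev : Bool) : List Bool → Int
  | [] => 0
  | f :: rest => (if f = true ∧ prev = false then 1 else 0) + pvCountStarts f rest

def corte_alt (lista : List Int) (altura : Int) : Int :=
  let flags := (lista.filter (fun x => x ≠ altura)).map (fun x => decide (x > altura))
  1 + pvCountStarts false flags

-- ===== PRECONDITION & SPEC =====
def Spec_corte (lista : List Int) (altura : Int) (out : Int) : Prop := out = corte_alt lista altura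
instance (lista : List Int) (altura : Int) (out : Int) : Decidable (Spec_corte lista altura out) := by unfold Spec_corte; infer_instance

-- ===== CLAIM (what is proved, stated in full; the proofs are below) =====
def Claim_equal_corte : Prop := ∀ (lista : List Int) (altura : Int), Dom_corte lista altura → Spec_corte lista altura (corte lista altura)

-- ===== LEMMAS AND PROOFS =====
-- invariant: A's mais_um is the negation of B's "previous flag" (prev)
theorem corte_inv (altura p : Int) (m : Bool) (l : List Int) :
    (l.foldl (fun (s : Int × Bool) x =>
      if x > altura ∧ s.2 = true then (s.1 + 1, false)
      else if x < altura then (s.1, true)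
      else s) (p, m)).1
    = p + pvCountStarts (!m) ((l.filter (fun x => x ≠ altura)).map (fun x => decide (x > altura))) := by
  induction l generalizing p m with
  | nil => simp [pvCountStarts]
  | cons x rest ih =>
    rcases lt_trichotomy x altura with h | h | h
    · have hne : x ≠ altura := ne_of_lt h
      simp only [List.foldl_cons, List.filter_cons]
      rw [if_neg (by rintro ⟨h1, _⟩; omega), if_pos h, ih]
      simp [pvCountStarts, hne, not_lt.mpr (le_of_lt h)]
    · subst h
      simp only [List.foldl_cons, List.filter_cons]
      rw [if_neg (by rintro ⟨h1, _⟩; omega), if_neg (by omega)]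
      simp [ih]
    · have hne : x ≠ altura := ne_of_gt h
      simp only [List.foldl_cons, List.filter_cons]
      cases m with
      | true =>
        rw [if_pos ⟨h, rfl⟩, ih]
        simp [pvCountStarts, hne, h]
        omega
      | false =>
        rw [if_neg (by rintro ⟨_, h2⟩; simp at h2), if_neg (by omega), ih]
        simp [pvCountStarts, hne, h]

-- ===== VERDICT (by name: the statement is the Claim_ definition above) =====
theorem corte_spec : Claim_equal_corte := by
  intro lista altura _
  unfold Spec_corte corte corte_alt
  rw [corte_inv]
  simp
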